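-- pv_equiv track=rewrite | github.com/SocialChangeLab/media-impact-monitor | backend-python/media_impact_monitor/trends/keyword_trend.py | xs_without_ys
-- ===== SOURCE A (Python) =====
-- def xs_without_ys(xs: list[str], ys: list[str], media_source: str) -> str:
--     # (x1 OR x2 OR ... OR xN) AND NOT (y1 OR y2 OR ... OR yN)
--     match media_source:
--         case "news_online" | "news_print":
--             return f"({' OR '.join(xs)}) AND NOT ({' OR '.join(ys)})"
--         case "web_google":
--             # max query length is 100 characters
--             # HACK
--             while sum(len(x) for x in xs) + 2 * len(xs) > 50:
--                 xs.pop()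
--             while sum(len(y) for y in ys) + 2 * len(ys) > 50:
--                 ys.pop()
--             return (
--                 f"{' '.join([f'+{x}' for x in xs])} {' '.join([f'-{y}' for y in ys])}"
--             )
-- ===== SOURCE B (Python) =====
-- def _join(sep, items):
--     out = ""
--     first = True
--     for it in items:
--         if first:
--             out = it
--             first = False
--         else:
--             out = out + sep + it
--     return out
--
--
-- def _trim50(lst):
--     # one forward pass: keep the longest prefix whose total of len(elem)+2 stays <= 50
--     total = 0
--     idx = 0
--     for elem in lst:
--         total += len(elem) + 2
--         if total > 50:
--             break
--         idx += 1
--     del lst[idx:]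
--
--
-- def xs_without_ys(xs: list, ys: list, media_source: str):
--     if media_source in ("news_online", "news_print"):
--         return "(" + _join(" OR ", xs) + ") AND NOT (" + _join(" OR ", ys) + ")"
--     if media_source == "web_google":
--         _trim50(xs)
--         _trim50(ys)
--         plus = _join(" ", ["+" + x for x in xs])
--         minus = _join(" ", ["-" + y for y in ys])
--         return plus + " " + minus
--     return None
-- ===== Notes on version B (the rewrite author's own statement) =====
-- stated objective: alternative
-- what changed: The quadratic pop-from-the-end while loops (re-summing the whole list each iteration) are replaced by a single forward pass keeping a running total that truncates each list in place at the first element overflowing the 50-character budget, and ' '.join/' OR '.join are replaced by an explicit accumulator fold.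
import Mathlib
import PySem

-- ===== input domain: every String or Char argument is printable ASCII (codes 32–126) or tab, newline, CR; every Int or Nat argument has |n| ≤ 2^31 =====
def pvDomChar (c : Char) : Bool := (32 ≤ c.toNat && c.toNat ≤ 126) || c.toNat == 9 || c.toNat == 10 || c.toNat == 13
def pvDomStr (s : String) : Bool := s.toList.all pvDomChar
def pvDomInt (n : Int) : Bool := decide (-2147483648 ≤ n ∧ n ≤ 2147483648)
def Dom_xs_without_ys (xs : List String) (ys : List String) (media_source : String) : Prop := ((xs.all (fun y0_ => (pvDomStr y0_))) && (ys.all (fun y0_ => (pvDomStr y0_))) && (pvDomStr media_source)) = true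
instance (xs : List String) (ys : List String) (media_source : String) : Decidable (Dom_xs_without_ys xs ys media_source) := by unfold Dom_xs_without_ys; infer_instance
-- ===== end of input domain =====

-- B replaces A's repeated pop-from-the-end trimming (which re-sums the whole list every
-- iteration) by one forward pass with a running total, and the str.join calls by an explicit
-- accumulator fold. Both A and B mutate xs/ys in place in the web_google branch (B uses del);
-- the equivalence proved here is about the RETURN value only.

-- ===== PORT A =====
-- while sum(len(x) for x in xs) + 2*len(xs) > 50: xs.pop()
def trimA (l : List String) : List String :=
  if (l.map PySem.Str.len).sum + 2 * (l.length : Int) > 50 then trimA l.dropLast else l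
termination_by l.length
decreasing_by
  rename_i h
  cases l with
  | nil => simp [PySem.Str.len] at h
  | cons a t => simp

def xs_without_ys (xs : List String) (ys : List String) (media_source : String) : Option String :=
  if media_source = "news_online" ∨ media_source = "news_print" then
    some ("(" ++ PySem.Str.join " OR " xs ++ ") AND NOT (" ++ PySem.Str.join " OR " ys ++ ")")
  else if media_source = "web_google" then
    let xs' := trimA xs
    let ys' := trimA ys
    some (PySem.Str.join " " (xs'.map (fun x => "+" ++ x)) ++ " " ++
          PySem.Str.join " " (ys'.map (fun y => "-" ++ y)))
  else none

-- ===== PORT B =====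
-- _join: accumulator fold, first element taken as the initial accumulator
def joinB (sep : String) : List String → String
  | [] => ""
  | x :: rest => rest.foldl (fun out it => out ++ sep ++ it) x

-- _trim50: forward pass computing the cut index idx with a running total, then `del lst[idx:]` = take idx
def trimIdxB : List String → Int → Nat
  | [], _ => 0
  | x :: rest, total =>
    let t := total + PySem.Str.len x + 2
    if t > 50 then 0 else 1 + trimIdxB rest t

def trimB (l : List String) : List String := l.take (trimIdxB l 0)

def xs_without_ys_alt (xs : List String) (ys : List String) (media_source : String) : Option String :=
  if media_source = "news_online" ∨ media_source = "news_print" then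
    some ("(" ++ joinB " OR " xs ++ ") AND NOT (" ++ joinB " OR " ys ++ ")")
  else if media_source = "web_google" then
    let xs' := trimB xs
    let ys' := trimB ys
    some (joinB " " (xs'.map (fun x => "+" ++ x)) ++ " " ++
          joinB " " (ys'.map (fun y => "-" ++ y)))
  else none

-- ===== PRECONDITION & SPEC =====
def Spec_xs_without_ys (xs : List String) (ys : List String) (media_source : String) (out : Option String) : Prop := out = xs_without_ys_alt xs ys media_source
instance (xs : List String) (ys : List String) (media_source : String) (out : Option String) : Decidable (Spec_xs_without_ys xs ys media_source out) := by unfold Spec_xs_without_ys; infer_instance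

-- ===== CLAIM (what is proved, stated in full; the proofs are below) =====
def Claim_equal_xs_without_ys : Prop := ∀ (xs : List String) (ys : List String) (media_source : String), Dom_xs_without_ys xs ys media_source → Spec_xs_without_ys xs ys media_source (xs_without_ys xs ys media_source)

-- ===== LEMMAS AND PROOFS =====

theorem charJoin (s a : List Char) (l : List (List Char)) :
    PySem.Chars.join s (a :: l) = a ++ l.flatMap (fun t => s ++ t) := by
  induction l generalizing a with
  | nil => simp [PySem.Chars.join_singleton]
  | cons b t ih => rw [PySem.Chars.join_cons_cons, ih b]; simp

theorem foldB_toList (sep : String) (rest : List String) (a : String) :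
    (rest.foldl (fun out it => out ++ sep ++ it) a).toList
      = a.toList ++ (rest.map String.toList).flatMap (fun t => sep.toList ++ t) := by
  induction rest generalizing a with
  | nil => simp
  | cons y t ih => simp [List.foldl_cons, ih]

theorem joinB_eq (sep : String) (l : List String) : PySem.Str.join sep l = joinB sep l := by
  cases l with
  | nil => simp [PySem.Str.join, joinB, PySem.Chars.join_nil]
  | cons x rest =>
    show PySem.Str.join sep (x :: rest) = rest.foldl (fun out it => out ++ sep ++ it) x
    unfold PySem.Str.join
    rw [List.map_cons, charJoin, ← foldB_toList]
    simp

theorem len_sum_nonneg (l : List String) : 0 ≤ (l.map PySem.Str.len).sum := by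
  apply List.sum_nonneg
  intro a ha
  simp only [List.mem_map] at ha
  obtain ⟨s, _, rfl⟩ := ha
  simp [PySem.Str.len]

-- trimIdxB never exceeds the list length
theorem trimIdxB_le (l : List String) (t : Int) : trimIdxB l t ≤ l.length := by
  induction l generalizing t with
  | nil => simp [trimIdxB]
  | cons x rest ih =>
    simp only [trimIdxB, List.length_cons]
    split
    · omega
    · have := ih (t + PySem.Str.len x + 2); omega

-- if the whole remaining list fits in the budget, the cut index is the full length
theorem trimIdxB_full (l : List String) (t : Int)
    (h : t + ((l.map PySem.Str.len).sum + 2 * l.length) ≤ 50) :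
    trimIdxB l t = l.length := by
  induction l generalizing t with
  | nil => simp [trimIdxB]
  | cons x rest ih =>
    simp only [List.map_cons, List.sum_cons, List.length_cons] at h
    have hnn := len_sum_nonneg rest
    simp only [trimIdxB, List.length_cons]
    have h1 : ¬ (t + PySem.Str.len x + 2 > 50) := by push_cast at h ⊢; omega
    rw [if_neg h1, ih (t + PySem.Str.len x + 2) (by push_cast at h ⊢; omega)]
    omega

-- if the remaining list overflows the budget, dropping its last element keeps the cut index
theorem trimIdxB_dropLast (l : List String) (t : Int)
    (h : t + ((l.map PySem.Str.len).sum + 2 * l.length) > 50) :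
    trimIdxB l t = trimIdxB l.dropLast t := by
  induction l generalizing t with
  | nil => simp
  | cons x rest ih =>
    simp only [List.map_cons, List.sum_cons, List.length_cons] at h
    cases rest with
    | nil =>
      simp only [List.map_nil, List.sum_nil, List.length_nil] at h
      have hd : ([x] : List String).dropLast = [] := rfl
      simp only [trimIdxB, hd]
      rw [if_pos (by simp only [PySem.Str.len] at h ⊢; push_cast at h ⊢; omega)]
    | cons y rest' =>
      have hd : (x :: y :: rest').dropLast = x :: (y :: rest').dropLast := rfl
      rw [hd]
      simp only [trimIdxB]
      split
      · rfl
      · rename_i hle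
        have hrec := ih (t + PySem.Str.len x + 2) (by push_cast at h ⊢; omega)
        simp only [trimIdxB] at hrec
        omega

theorem trimA_eq (l : List String) : trimA l = trimB l := by
  induction hn : l.length using Nat.strong_induction_on generalizing l with
  | _ n ih =>
    rw [trimA]
    split
    · rename_i hgt
      have hne : l ≠ [] := by
        rintro rfl; simp at hgt
      have hpos : 0 < l.length := List.length_pos_iff.mpr hne
      have hlen : l.dropLast.length < n := by
        rw [List.length_dropLast, hn]; omega
      have h50 : (0 : Int) + ((l.map PySem.Str.len).sum + 2 * l.length) > 50 := by omega
      rw [ih l.dropLast.length (hn ▸ hlen) l.dropLast rfl]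
      unfold trimB
      rw [← trimIdxB_dropLast l 0 h50]
      have hk : trimIdxB l 0 ≤ l.dropLast.length :=
        (trimIdxB_dropLast l 0 h50) ▸ trimIdxB_le l.dropLast 0
      rw [List.dropLast_eq_take, List.take_take]
      congr 1
      rw [List.length_dropLast] at hk
      omega
    · rename_i hle
      unfold trimB
      rw [trimIdxB_full l 0 (by omega), List.take_length]

-- ===== VERDICT (by name: the statement is the Claim_ definition above) =====
theorem xs_without_ys_spec : Claim_equal_xs_without_ys := by
  intro xs ys ms _
  unfold Spec_xs_without_ys xs_without_ys xs_without_ys_alt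
  simp only [joinB_eq, trimA_eq]
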